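-- pv_equiv track=rewrite | github.com/Senum2001/Anomaly_Detection_SDC_Pebble | pipeline.py | _filter_faulty_overlapping_potential
-- ===== SOURCE A (Python) =====
-- def _filter_faulty_overlapping_potential(boxes, labels):
--     def is_overlapping(boxA, boxB):
--         xA = max(boxA[0], boxB[0])
--         yA = max(boxA[1], boxB[1])
--         xB = min(boxA[0] + boxA[2], boxB[0] + boxB[2])
--         yB = min(boxA[1] + boxA[3], boxB[1] + boxB[3])
--         return (xB > xA) and (yB > yA)
--
--     filtered_boxes, filtered_labels = [], []
--     for (box, label) in zip(boxes, labels):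
--         if label == "Point Overload (Potential)":
--             keep = True
--             for (fbox, flabel) in zip(boxes, labels):
--                 if flabel == "Point Overload (Faulty)" and is_overlapping(box, fbox):
--                     keep = False
--                     break
--             if keep:
--                 filtered_boxes.append(box)
--                 filtered_labels.append(label)
--         else:
--             filtered_boxes.append(box)
--             filtered_labels.append(label)
--     return filtered_boxes, filtered_labels
-- ===== SOURCE B (Python) =====
-- def _filter_faulty_overlapping_potential(boxes, labels):
--     pairs = list(zip(boxes, labels))
--
--     # Build a sweep index only if some potential box needs checking:
--     # faulty boxes sorted by their left edge.
--     if any(l == "Point Overload (Potential)" for _, l in pairs):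
--         faulty = sorted((b for b, l in pairs if l == "Point Overload (Faulty)"),
--                         key=lambda b: b[0])
--     else:
--         faulty = []
--
--     def hits(box):
--         # Sweep over faulty boxes in left-edge order: once a faulty box starts
--         # at or past this box's right edge, no later one can overlap either.
--         for f in faulty:
--             if f[0] >= box[0] + box[2]:
--                 return False
--             if (min(box[0] + box[2], f[0] + f[2]) > max(box[0], f[0])
--                     and min(box[1] + box[3], f[1] + f[3]) > max(box[1], f[1])):
--                 return True
--         return False
--
--     kept = [(b, l) for b, l in pairs
--             if l != "Point Overload (Potential)" or not hits(b)]
--     return [b for b, _ in kept], [l for _, l in kept]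
-- ===== Notes on version B (the rewrite author's own statement) =====
-- stated objective: alternative
-- what changed: B replaces A's nested rescans of all (box,label) pairs by a sweep-line index: the faulty boxes are extracted once and sorted by left edge, and each potential box scans that sorted list with an early cut-off as soon as a faulty box starts past its right edge.
import Mathlib
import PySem

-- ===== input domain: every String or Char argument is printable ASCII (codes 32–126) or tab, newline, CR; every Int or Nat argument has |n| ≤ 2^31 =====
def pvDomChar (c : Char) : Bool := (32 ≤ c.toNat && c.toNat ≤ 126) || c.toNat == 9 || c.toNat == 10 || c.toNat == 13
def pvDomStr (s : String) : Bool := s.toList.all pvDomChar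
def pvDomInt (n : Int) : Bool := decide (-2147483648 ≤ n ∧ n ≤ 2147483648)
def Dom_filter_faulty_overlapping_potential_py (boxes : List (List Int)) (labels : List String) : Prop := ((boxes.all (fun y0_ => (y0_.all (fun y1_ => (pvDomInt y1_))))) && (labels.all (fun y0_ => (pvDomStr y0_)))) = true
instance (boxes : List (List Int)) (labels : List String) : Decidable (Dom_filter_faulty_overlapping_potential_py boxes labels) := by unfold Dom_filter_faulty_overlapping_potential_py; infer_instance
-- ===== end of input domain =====

-- B replaces A's nested rescans by a sweep index: faulty boxes sorted once by
-- left edge, each potential box scans the sorted list with an early cut-off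
-- (objective: alternative).

-- ===== PORT A =====
-- A's helper is_overlapping. Python indexes box[0..3]; exact under Pre_ (the
-- boxes it is called on have ≥ 4 entries), ported with pyGetD _ _ 0 which
-- agrees with box[i] there.
def pvOverlap (boxA boxB : List Int) : Bool :=
  let xA := max (PySem.List.pyGetD boxA 0 0) (PySem.List.pyGetD boxB 0 0)
  let yA := max (PySem.List.pyGetD boxA 1 0) (PySem.List.pyGetD boxB 1 0)
  let xB := min (PySem.List.pyGetD boxA 0 0 + PySem.List.pyGetD boxA 2 0)
               (PySem.List.pyGetD boxB 0 0 + PySem.List.pyGetD boxB 2 0)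
  let yB := min (PySem.List.pyGetD boxA 1 0 + PySem.List.pyGetD boxA 3 0)
               (PySem.List.pyGetD boxB 1 0 + PySem.List.pyGetD boxB 3 0)
  decide (xB > xA) && decide (yB > yA)

-- A's inner loop: 'keep' flag with break at the first overlapping faulty pair.
def pvKeepLoop (box : List Int) : List (List Int × String) → Bool
  | [] => true
  | (fbox, flabel) :: rest =>
    if flabel = "Point Overload (Faulty)" ∧ pvOverlap box fbox then false
    else pvKeepLoop box rest

def filter_faulty_overlapping_potential_py (boxes : List (List Int)) (labels : List String) : List (List Int) × List String :=
  let pairs := boxes.zip labels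
  pairs.foldl (fun acc p =>
    if p.2 = "Point Overload (Potential)" then
      if pvKeepLoop p.1 pairs then (acc.1 ++ [p.1], acc.2 ++ [p.2]) else acc
    else (acc.1 ++ [p.1], acc.2 ++ [p.2])) ([], [])

-- ===== PORT B =====
-- B's per-box sweep: scan the left-edge-sorted faulty list, returning early
-- once a faulty box starts at or past this box's right edge. The overlap test
-- is the same min/max expression A's helper computes, written inline in Source B;
-- it is shared here as pvOverlap.
def pvScan (box : List Int) : List (List Int) → Bool
  | [] => false
  | f :: rest =>
    if PySem.List.pyGetD box 0 0 + PySem.List.pyGetD box 2 0 ≤ PySem.List.pyGetD f 0 0 then false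
    else if pvOverlap box f then true
    else pvScan box rest

def filter_faulty_overlapping_potential_py_alt (boxes : List (List Int)) (labels : List String) : List (List Int) × List String :=
  let pairs := boxes.zip labels
  let faulty :=
    if pairs.any (fun p => p.2 == "Point Overload (Potential)") then
      PySem.List.sorted ((pairs.filter (fun p => p.2 == "Point Overload (Faulty)")).map Prod.fst)
        (fun b => PySem.List.pyGetD b 0 0) false
    else []
  let kept := pairs.filter (fun p =>
    p.2 != "Point Overload (Potential)" || !(pvScan p.1 faulty))
  (kept.map Prod.fst, kept.map Prod.snd)

-- ===== PRECONDITION & SPEC =====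
-- Python A raises IndexError only when is_overlapping reads a box with fewer
-- than 4 entries; Pre_ requires, whenever both a "(Potential)" and a "(Faulty)"
-- label occur among the zipped pairs, that every such labelled box have length
-- ≥ 4. Slightly narrower than exact: a short faulty box that every potential
-- box happens to break before reaching is also excluded (see claim.json cites).
def Pre_filter_faulty_overlapping_potential_py (boxes : List (List Int)) (labels : List String) : Prop :=
  ((∃ p ∈ boxes.zip labels, p.2 = "Point Overload (Potential)") ∧
   (∃ q ∈ boxes.zip labels, q.2 = "Point Overload (Faulty)")) →
  ∀ p ∈ boxes.zip labels,
    (p.2 = "Point Overload (Potential)" ∨ p.2 = "Point Overload (Faulty)") → 4 ≤ p.1.length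
instance (boxes : List (List Int)) (labels : List String) : Decidable (Pre_filter_faulty_overlapping_potential_py boxes labels) := by unfold Pre_filter_faulty_overlapping_potential_py; infer_instance

def pvWitness_filter_faulty_overlapping_potential_py : List (List Int) × List String :=
  ([[0,0,2,2],[1,1,2,2],[10,10,1,1]],
   ["Point Overload (Potential)", "Point Overload (Faulty)", "Point Overload (Potential)"])

def Spec_filter_faulty_overlapping_potential_py (boxes : List (List Int)) (labels : List String) (out : List (List Int) × List String) : Prop := out = filter_faulty_overlapping_potential_py_alt boxes labels
instance (boxes : List (List Int)) (labels : List String) (out : List (List Int) × List String) : Decidable (Spec_filter_faulty_overlapping_potential_py boxes labels out) := by unfold Spec_filter_faulty_overlapping_potential_py; infer_instance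

-- ===== CLAIM (what is proved, stated in full; the proofs are below) =====
def Claim_equal_filter_faulty_overlapping_potential_py : Prop := ∀ (boxes : List (List Int)) (labels : List String), Dom_filter_faulty_overlapping_potential_py boxes labels → Pre_filter_faulty_overlapping_potential_py boxes labels → Spec_filter_faulty_overlapping_potential_py boxes labels (filter_faulty_overlapping_potential_py boxes labels)

-- ===== LEMMAS AND PROOFS =====

-- Once a faulty box starts at or past the query box's right edge it cannot overlap.
theorem pvOverlap_false_of_cut (box f : List Int)
    (h : PySem.List.pyGetD box 0 0 + PySem.List.pyGetD box 2 0 ≤ PySem.List.pyGetD f 0 0) :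
    pvOverlap box f = false := by
  simp only [pvOverlap, Bool.and_eq_false_iff, decide_eq_false_iff_not, not_lt]
  left
  calc min (PySem.List.pyGetD box 0 0 + PySem.List.pyGetD box 2 0)
          (PySem.List.pyGetD f 0 0 + PySem.List.pyGetD f 2 0)
      ≤ PySem.List.pyGetD box 0 0 + PySem.List.pyGetD box 2 0 := min_le_left _ _
    _ ≤ PySem.List.pyGetD f 0 0 := h
    _ ≤ max (PySem.List.pyGetD box 0 0) (PySem.List.pyGetD f 0 0) := le_max_right _ _

-- The early-cut sweep over a list sorted by left edge finds exactly 'some overlap'.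
theorem pvScan_eq_any_of_sorted (box : List Int) (F : List (List Int))
    (hs : F.Pairwise (fun a b => PySem.List.pyGetD a 0 0 ≤ PySem.List.pyGetD b 0 0)) :
    pvScan box F = F.any (fun f => pvOverlap box f) := by
  induction F with
  | nil => rfl
  | cons f rest ih =>
    rcases List.pairwise_cons.mp hs with ⟨hf, hrest⟩
    by_cases hcut : PySem.List.pyGetD box 0 0 + PySem.List.pyGetD box 2 0 ≤ PySem.List.pyGetD f 0 0
    · have h1 := pvOverlap_false_of_cut box f hcut
      have h2 : rest.any (fun g => pvOverlap box g) = false := by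
        simp only [List.any_eq_false]
        intro g hg
        simp [pvOverlap_false_of_cut box g (le_trans hcut (hf g hg))]
      simp [pvScan, hcut, h1, h2]
    · by_cases ho : pvOverlap box f = true
      · simp [pvScan, hcut, ho]
      · simp [pvScan, hcut, ho, ih hrest]

-- 'any' is invariant under permutation (sorting the faulty list).
theorem any_eq_of_perm {α : Type} {l₁ l₂ : List α} (h : l₁.Perm l₂) (p : α → Bool) :
    l₁.any p = l₂.any p := by
  cases hb : l₂.any p
  · simp only [List.any_eq_false] at hb ⊢
    exact fun x hx => hb x (h.mem_iff.mp hx)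
  · simp only [List.any_eq_true] at hb ⊢
    obtain ⟨x, hx, hpx⟩ := hb
    exact ⟨x, h.mem_iff.mpr hx, hpx⟩

-- A's break-loop over all pairs equals 'some overlapping faulty box'.
theorem pvKeepLoop_eq_any (box : List Int) (l : List (List Int × String)) :
    pvKeepLoop box l
      = !(((l.filter (fun p => p.2 == "Point Overload (Faulty)")).map Prod.fst).any
          (fun f => pvOverlap box f)) := by
  induction l with
  | nil => rfl
  | cons hd tl ih =>
    obtain ⟨fbox, flabel⟩ := hd
    by_cases hf : flabel = "Point Overload (Faulty)"
    · by_cases ho : pvOverlap box fbox = true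
      · simp [pvKeepLoop, hf, ho]
      · simp [pvKeepLoop, hf, ho, ih]
    · simp [pvKeepLoop, hf, ih]

-- A's break-loop equals B's sweep over the sorted faulty list.
theorem pvKeepLoop_eq_scan (box : List Int) (l : List (List Int × String)) :
    pvKeepLoop box l
      = !(pvScan box (PySem.List.sorted
            ((l.filter (fun p => p.2 == "Point Overload (Faulty)")).map Prod.fst)
            (fun b => PySem.List.pyGetD b 0 0) false)) := by
  rw [pvKeepLoop_eq_any,
    pvScan_eq_any_of_sorted box _ (PySem.List.sorted_pairwise _ _),
    any_eq_of_perm (PySem.List.sorted_perm _ _ _)]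

-- the conditional-append foldl is filter-then-unzip
theorem pvFoldFilter (c : (List Int × String) → Bool) (l : List (List Int × String))
    (a : List (List Int)) (b : List String) :
    l.foldl (fun acc p =>
        if c p then (acc.1 ++ [p.1], acc.2 ++ [p.2]) else acc) (a, b)
      = (a ++ (l.filter c).map Prod.fst, b ++ (l.filter c).map Prod.snd) := by
  induction l generalizing a b with
  | nil => simp
  | cons hd tl ih =>
    by_cases h : c hd = true
    · simp [List.foldl_cons, h, ih]
    · simp [List.foldl_cons, h, ih]

theorem filter_faulty_overlapping_potential_py_spec : Claim_equal_filter_faulty_overlapping_potential_py := by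
  intro boxes labels _ _
  unfold Spec_filter_faulty_overlapping_potential_py
  unfold filter_faulty_overlapping_potential_py filter_faulty_overlapping_potential_py_alt
  dsimp only
  set pairs := boxes.zip labels with hp
  by_cases hpot : pairs.any (fun p => p.2 == "Point Overload (Potential)") = true
  · -- some potential box exists: B's index is the sorted faulty list
    rw [if_pos hpot]
    have hstep :
        (fun (acc : List (List Int) × List String) (p : List Int × String) =>
          if p.2 = "Point Overload (Potential)" then
            if pvKeepLoop p.1 pairs then (acc.1 ++ [p.1], acc.2 ++ [p.2]) else acc
          else (acc.1 ++ [p.1], acc.2 ++ [p.2]))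
        = (fun acc p =>
          if (p.2 != "Point Overload (Potential)"
              || !(pvScan p.1 (PySem.List.sorted
                    ((pairs.filter (fun q => q.2 == "Point Overload (Faulty)")).map Prod.fst)
                    (fun b => PySem.List.pyGetD b 0 0) false))) then
            (acc.1 ++ [p.1], acc.2 ++ [p.2]) else acc) := by
      funext acc p
      rw [← pvKeepLoop_eq_scan]
      by_cases h : p.2 = "Point Overload (Potential)"
      · by_cases hk : pvKeepLoop p.1 pairs = true <;> simp [h, hk]
      · simp [h]
    rw [hstep, pvFoldFilter]
    simp
  · -- no potential box: A keeps every pair, B's filter condition is always true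
    rw [if_neg hpot]
    have hnone : ∀ p ∈ pairs, p.2 ≠ "Point Overload (Potential)" := by
      simp only [List.any_eq_true, not_exists, not_and, Bool.not_eq_true, beq_eq_false_iff_ne] at hpot
      intro p hpm
      simpa using hpot p hpm
    have hcongr : pairs.foldl (fun acc p =>
        if p.2 = "Point Overload (Potential)" then
          if pvKeepLoop p.1 pairs then (acc.1 ++ [p.1], acc.2 ++ [p.2]) else acc
        else (acc.1 ++ [p.1], acc.2 ++ [p.2])) (([], []) : List (List Int) × List String)
        = pairs.foldl (fun acc p =>
        if (fun _ : List Int × String => true) p then (acc.1 ++ [p.1], acc.2 ++ [p.2]) else acc)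
          (([], []) : List (List Int) × List String) := by
      apply PySem.List.foldl_congr_mem
      intro acc p hpm
      simp [hnone p hpm]
    rw [hcongr, pvFoldFilter (fun _ => true)]
    have hfilt : pairs.filter
        (fun p => p.2 != "Point Overload (Potential)" || !(pvScan p.1 [])) = pairs := by
      apply List.filter_eq_self.mpr
      intro p _
      simp [pvScan]
    rw [hfilt]
    simp
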